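-- pv_equiv track=rewrite | github.com/3r10/SimPly | simply_df.py | edges2print
-- ===== SOURCE A (Python) =====
-- def edge_length(edge):
--   if edge[0]<edge[1]:
--     return edge[1]-edge[0]-1
--   return edge[0]-edge[1]+1
--
-- def are_overlapping(edge1,edge2):
--   return not(edge1[0]<edge1[1]<=edge2[0]<edge2[1]
--           or edge1[0]<edge1[1]<edge2[1]<=edge2[0]
--           or edge1[1]<=edge1[0]<edge2[0]<edge2[1]
--           or edge1[1]<=edge1[0]<edge2[1]<=edge2[0]
--           or edge2[0]<edge2[1]<=edge1[0]<edge1[1]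
--           or edge2[0]<edge2[1]<edge1[1]<=edge1[0]
--           or edge2[1]<=edge2[0]<edge1[0]<edge1[1]
--           or edge2[1]<=edge2[0]<edge1[1]<=edge1[0])
--
-- def edges2print(successors):
--   layers = []
--   max_length = len(successors)+1
--   for length in range(max_length+1):
--     for i in range(len(successors)):
--       for j in successors[i]:
--         edge = [i,j]
--         if edge_length(edge)==length and j!=-1:
--           i_layer = 0
--           ok = False
--           while i_layer<len(layers) and not ok:
--             ok = True
--             i_edge = 0
--             while i_edge<len(layers[i_layer]) and ok:
--               ok = not are_overlapping(edge,layers[i_layer][i_edge])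
--               i_edge += 1
--             if ok:
--               layers[i_layer].append(edge)
--             i_layer += 1
--           if not ok:
--             layers.append([edge])
--   return layers
-- ===== SOURCE B (Python) =====
-- def are_overlapping(edge1,edge2):
--   return not(edge1[0]<edge1[1]<=edge2[0]<edge2[1]
--           or edge1[0]<edge1[1]<edge2[1]<=edge2[0]
--           or edge1[1]<=edge1[0]<edge2[0]<edge2[1]
--           or edge1[1]<=edge1[0]<edge2[1]<=edge2[0]
--           or edge2[0]<edge2[1]<=edge1[0]<edge1[1]
--           or edge2[0]<edge2[1]<edge1[1]<=edge1[0]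
--           or edge2[1]<=edge2[0]<edge1[0]<edge1[1]
--           or edge2[1]<=edge2[0]<edge1[1]<=edge1[0])
--
-- def edges2print(successors):
--   n = len(successors)
--   max_length = n + 1
--   # bucket edges by length in one pass (edges longer than max_length are never drawn)
--   buckets = [[] for _ in range(max_length + 1)]
--   for i, succ in enumerate(successors):
--     for j in succ:
--       if j != -1:
--         length = j - i - 1 if i < j else i - j + 1
--         if 0 <= length <= max_length:
--           buckets[length].append([i, j])
--   # first-fit placement, shortest edges first
--   layers = []
--   for bucket in buckets:
--     for edge in bucket:
--       for layer in layers: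
--         if all(not are_overlapping(edge, e) for e in layer):
--           layer.append(edge)
--           break
--       else:
--         layers.append([edge])
--   return layers
-- ===== Notes on version B (the rewrite author's own statement) =====
-- stated objective: alternative
-- what changed: B buckets the edges by length in a single pass over the successor lists instead of rescanning every edge once per candidate length value (max_length+1 full scans in A); the greedy first-fit layer placement is unchanged, and on inputs where placement dominates the overall cost is similar.
import Mathlib
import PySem

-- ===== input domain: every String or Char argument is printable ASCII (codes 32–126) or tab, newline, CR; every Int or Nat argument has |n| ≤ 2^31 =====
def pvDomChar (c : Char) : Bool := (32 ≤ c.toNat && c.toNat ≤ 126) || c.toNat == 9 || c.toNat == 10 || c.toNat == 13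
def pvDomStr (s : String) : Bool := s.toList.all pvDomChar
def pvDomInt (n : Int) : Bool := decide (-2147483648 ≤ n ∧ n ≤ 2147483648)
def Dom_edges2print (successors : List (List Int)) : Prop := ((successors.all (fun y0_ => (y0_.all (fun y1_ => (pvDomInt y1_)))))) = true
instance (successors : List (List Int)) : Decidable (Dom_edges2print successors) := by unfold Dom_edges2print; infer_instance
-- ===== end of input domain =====

-- B buckets the edges by length in one pass instead of rescanning every edge for every candidate
-- length value; the greedy first-fit layer placement is unchanged.

-- ===== PORT A =====
-- edge_length / are_overlapping: both programs only ever apply them to the two-element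
-- lists [i, j] they construct, so a pattern match on [a, b] is exact there.
def edgeLen : List Int → Int
  | [a, b] => if a < b then b - a - 1 else a - b + 1
  | _ => 0

def areOverlapping : List Int → List Int → Bool
  | [a, b], [c, d] =>
      !(decide (a < b ∧ b ≤ c ∧ c < d) || decide (a < b ∧ b < d ∧ d ≤ c)
        || decide (b ≤ a ∧ a < c ∧ c < d) || decide (b ≤ a ∧ a < d ∧ d ≤ c)
        || decide (c < d ∧ d ≤ a ∧ a < b) || decide (c < d ∧ d < b ∧ b ≤ a)
        || decide (d ≤ c ∧ c < a ∧ a < b) || decide (d ≤ c ∧ c < b ∧ b ≤ a))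
  | _, _ => true

-- inner 'while i_edge < len(layers[i_layer]) and ok' loop of A
def checkLayerA (edge : List Int) : List (List Int) → Bool
  | [] => true
  | e2 :: rest => if areOverlapping edge e2 then false else checkLayerA edge rest

-- outer 'while i_layer < len(layers) and not ok' loop of A (first fit, else a new layer)
def placeA (edge : List Int) : List (List (List Int)) → List (List (List Int))
  | [] => [[edge]]
  | layer :: rest =>
      if checkLayerA edge layer then (layer ++ [edge]) :: rest
      else layer :: placeA edge rest

def edges2print (successors : List (List Int)) : List (List (List Int)) :=
  let maxLength : Int := (successors.length : Int) + 1
  (PySem.List.pyRange 0 (maxLength + 1) 1).foldl (fun layers length =>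
    (PySem.List.enumerate successors).foldl (fun layers p =>
      p.2.foldl (fun layers j =>
        let edge : List Int := [p.1, j]
        if edgeLen edge == length && j != -1 then placeA edge layers else layers)
        layers) layers) []

-- ===== PORT B =====
-- B's placement: for-loop with all(...) and break, else append a new layer
def placeB (edge : List Int) : List (List (List Int)) → List (List (List Int))
  | [] => [[edge]]
  | layer :: rest =>
      if layer.all (fun e2 => !areOverlapping edge e2) then (layer ++ [edge]) :: rest
      else layer :: placeB edge rest

def edges2print_alt (successors : List (List Int)) : List (List (List Int)) :=
  let n := successors.length
  let maxLength : Int := (n : Int) + 1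
  let buckets :=
    (PySem.List.enumerate successors).foldl (fun bs p =>
      p.2.foldl (fun bs j =>
        if j != -1 then
          let len : Int := if p.1 < j then j - p.1 - 1 else p.1 - j + 1
          if 0 ≤ len && len ≤ maxLength then
            -- buckets[length].append([i, j]); 0 ≤ len is guarded, so .toNat is the exact index
            bs.modify len.toNat (fun b => b ++ [[p.1, j]])
          else bs
        else bs) bs)
      (List.replicate (n + 2) ([] : List (List Int)))
  buckets.foldl (fun layers bucket =>
    bucket.foldl (fun layers edge => placeB edge layers) layers) []

-- ===== PRECONDITION & SPEC =====
def Spec_edges2print (successors : List (List Int)) (out : List (List (List Int))) : Prop := out = edges2print_alt successors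
instance (successors : List (List Int)) (out : List (List (List Int))) : Decidable (Spec_edges2print successors out) := by unfold Spec_edges2print; infer_instance

-- ===== CLAIM (what is proved, stated in full; the proofs are below) =====
def Claim_equal_edges2print : Prop := ∀ (successors : List (List Int)), Dom_edges2print successors → Spec_edges2print successors (edges2print successors)

-- ===== LEMMAS AND PROOFS =====

-- the stream of (i, j) pairs both programs enumerate, in encounter order
def pairsOf (successors : List (List Int)) : List (Int × Int) :=
  (PySem.List.enumerate successors).flatMap (fun p => p.2.map (fun j => (p.1, j)))

-- a nested fold over enumerate/successors is a fold over the pair stream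
theorem foldl_pairs {S : Type} (g : S → Int → Int → S) :
    ∀ (ps : List (Int × List Int)) (s : S),
      ps.foldl (fun s p => p.2.foldl (fun s j => g s p.1 j) s) s
      = (ps.flatMap (fun p => p.2.map (fun j => (p.1, j)))).foldl (fun s q => g s q.1 q.2) s := by
  intro ps
  induction ps with
  | nil => intro s; rfl
  | cons p rest ih =>
      intro s
      simp only [List.flatMap_cons, List.foldl_append, List.foldl_cons, List.foldl_map, ih]

-- a fold over nested lists is a fold over their concatenation
theorem foldl_flatMap {S α β : Type} (h : α → List β) (f : S → β → S) :
    ∀ (xs : List α) (s : S),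
      xs.foldl (fun s x => (h x).foldl f s) s = (xs.flatMap h).foldl f s := by
  intro xs
  induction xs with
  | nil => intro s; rfl
  | cons x rest ih => intro s; simp only [List.flatMap_cons, List.foldl_append, List.foldl_cons, ih]

theorem checkLayerA_eq_all (edge : List Int) :
    ∀ layer : List (List Int), checkLayerA edge layer = layer.all (fun e2 => !areOverlapping edge e2) := by
  intro layer
  induction layer with
  | nil => rfl
  | cons e2 rest ih =>
      simp only [checkLayerA, List.all_cons, ih]
      cases h : areOverlapping edge e2 <;> simp

theorem placeA_eq_placeB (edge : List Int) :
    ∀ layers, placeA edge layers = placeB edge layers := by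
  intro layers
  induction layers with
  | nil => rfl
  | cons layer rest ih => simp only [placeA, placeB, checkLayerA_eq_all, ih]

-- predicate with which B's bucket k collects pairs
def bucketPred (maxLength : Int) (k : Nat) (q : Int × Int) : Bool :=
  q.2 != -1 &&
    ((0 ≤ (if q.1 < q.2 then q.2 - q.1 - 1 else q.1 - q.2 + 1) : Bool)
      && ((if q.1 < q.2 then q.2 - q.1 - 1 else q.1 - q.2 + 1) ≤ maxLength)) &&
    (if q.1 < q.2 then q.2 - q.1 - 1 else q.1 - q.2 + 1).toNat == k

-- characterisation of B's bucket fold: bucket k ends as what it started with,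
-- followed by the stream's pairs of length k, in order
theorem bucket_char (maxLength : Int) :
    ∀ (qs : List (Int × Int)) (bs : List (List (List Int))) (k : Nat),
      (qs.foldl (fun bs q =>
        if q.2 != -1 then
          let len : Int := if q.1 < q.2 then q.2 - q.1 - 1 else q.1 - q.2 + 1
          if 0 ≤ len && len ≤ maxLength then
            bs.modify len.toNat (fun b => b ++ [[q.1, q.2]])
          else bs
        else bs) bs)[k]?
      = (bs[k]?).map (fun b => b ++ (qs.filter (bucketPred maxLength k)).map (fun q => [q.1, q.2])) := by
  intro qs
  induction qs with
  | nil => intro bs k; simp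
  | cons q rest ih =>
      intro bs k
      simp only [List.foldl_cons, List.filter_cons]
      by_cases h1 : q.2 != -1
      · simp only [h1, if_pos]
        set len : Int := if q.1 < q.2 then q.2 - q.1 - 1 else q.1 - q.2 + 1 with hlen
        by_cases h2 : (0 ≤ len && len ≤ maxLength) = true
        · simp only [h2, if_pos, ih, List.getElem?_modify]
          by_cases h3 : len.toNat = k
          · have hp : bucketPred maxLength k q = true := by
              simp [bucketPred, ← hlen, h1, h2, h3]
            simp [h3, hp, Option.map_map, Function.comp_def, List.append_assoc]
          · have hp : bucketPred maxLength k q = false := by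
              simp only [bucketPred, ← hlen]
              simp [h3]
            simp [h3, hp]
        · have hp : bucketPred maxLength k q = false := by
            simp only [bucketPred, ← hlen]
            simp only [Bool.not_eq_true] at h2
            simp [h2]
          rw [if_neg h2, ih, hp]
          simp
      · have h1' : (q.2 != -1) = false := by simpa using h1
        have hp : bucketPred maxLength k q = false := by simp [bucketPred, h1']
        rw [if_neg h1, ih, hp]
        simp

-- A's per-length filter equals B's bucket predicate for lengths 0 .. maxLength
theorem pred_eq (n : Nat) (k : Nat) (hk : k < n + 2) (q : Int × Int) :
    (edgeLen [q.1, q.2] == (k : Int) && q.2 != -1) = bucketPred ((n : Int) + 1) k q := by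
  rcases q with ⟨i, j⟩
  by_cases hj : j = -1
  · simp [hj, bucketPred]
  · have hj' : ((j != -1) : Bool) = true := by simp [hj]
    simp only [bucketPred, edgeLen, hj', Bool.and_true, Bool.true_and]
    have h0 : (0 : Int) ≤ if i < j then j - i - 1 else i - j + 1 := by split <;> omega
    rw [Bool.eq_iff_iff]
    simp only [beq_iff_eq, Bool.and_eq_true, decide_eq_true_eq]
    constructor
    · intro h; refine ⟨⟨h0, by omega⟩, by omega⟩
    · rintro ⟨⟨-, h2⟩, h3⟩; omega

-- A as one first-fit fold over the length-bucketed pair stream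
theorem A_as_stream (s : List (List Int)) :
    edges2print s
    = ((List.range (s.length + 2)).flatMap
        (fun (k : Nat) => ((pairsOf s).filter (fun q => edgeLen [q.1, q.2] == (k : Int) && q.2 != -1)).map
          (fun q => [q.1, q.2]))).foldl (fun ly e => placeA e ly) [] := by
  have hinner : ∀ (L : Int) (ly : List (List (List Int))),
      (PySem.List.enumerate s).foldl (fun layers p =>
        p.2.foldl (fun layers j =>
          let edge : List Int := [p.1, j]
          if edgeLen edge == L && j != -1 then placeA edge layers else layers) layers) ly
      = ((((pairsOf s).filter (fun q => edgeLen [q.1, q.2] == L && q.2 != -1)).map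
          (fun q => [q.1, q.2]))).foldl (fun ly e => placeA e ly) ly := by
    intro L ly
    calc (PySem.List.enumerate s).foldl (fun layers p =>
          p.2.foldl (fun layers j =>
            let edge : List Int := [p.1, j]
            if edgeLen edge == L && j != -1 then placeA edge layers else layers) layers) ly
        = (pairsOf s).foldl (fun ly q =>
            if edgeLen [q.1, q.2] == L && q.2 != -1 then placeA [q.1, q.2] ly else ly) ly :=
          foldl_pairs (fun layers i j =>
            if edgeLen [i, j] == L && j != -1 then placeA [i, j] layers else layers)
            (PySem.List.enumerate s) ly
      _ = ((pairsOf s).filter (fun q => edgeLen [q.1, q.2] == L && q.2 != -1)).foldl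
            (fun ly q => placeA [q.1, q.2] ly) ly := by
          rw [PySem.List.foldl_if_eq_foldl_filter]
      _ = ((((pairsOf s).filter (fun q => edgeLen [q.1, q.2] == L && q.2 != -1)).map
            (fun q => [q.1, q.2]))).foldl (fun ly e => placeA e ly) ly := by
          rw [List.foldl_map]
  have e1 : edges2print s
      = (PySem.List.pyRange 0 ((s.length : Int) + 1 + 1) 1).foldl (fun layers length =>
          (PySem.List.enumerate s).foldl (fun layers p =>
            p.2.foldl (fun layers j =>
              let edge : List Int := [p.1, j]
              if edgeLen edge == length && j != -1 then placeA edge layers else layers) layers)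
            layers) [] := rfl
  rw [e1]
  have houter : (PySem.List.pyRange 0 ((s.length : Int) + 1 + 1) 1).foldl (fun layers length =>
          (PySem.List.enumerate s).foldl (fun layers p =>
            p.2.foldl (fun layers j =>
              let edge : List Int := [p.1, j]
              if edgeLen edge == length && j != -1 then placeA edge layers else layers) layers)
            layers) []
      = (PySem.List.pyRange 0 ((s.length : Int) + 1 + 1) 1).foldl (fun ly L =>
          ((((pairsOf s).filter (fun q => edgeLen [q.1, q.2] == L && q.2 != -1)).map
            (fun q => [q.1, q.2]))).foldl (fun ly e => placeA e ly) ly) [] := by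
    congr 1
    funext ly L
    exact hinner L ly
  rw [houter, foldl_flatMap]
  congr 1
  rw [PySem.List.pyRange_one]
  have hn : (((s.length : Int) + 1 + 1) - 0).toNat = s.length + 2 := by omega
  rw [hn, List.flatMap_map]
  refine List.flatMap_congr (fun k _ => ?_)
  simp

-- B as one first-fit fold over the same stream (after the filters are identified)
theorem B_as_stream (s : List (List Int)) :
    edges2print_alt s
    = ((List.range (s.length + 2)).flatMap
        (fun (k : Nat) => ((pairsOf s).filter (bucketPred ((s.length : Int) + 1) k)).map
          (fun q => [q.1, q.2]))).foldl (fun ly e => placeB e ly) [] := by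
  have hbuild : (PySem.List.enumerate s).foldl (fun bs p =>
        p.2.foldl (fun bs j =>
          if j != -1 then
            let len : Int := if p.1 < j then j - p.1 - 1 else p.1 - j + 1
            if 0 ≤ len && len ≤ ((s.length : Int) + 1) then
              bs.modify len.toNat (fun b => b ++ [[p.1, j]])
            else bs
          else bs) bs)
        (List.replicate (s.length + 2) ([] : List (List Int)))
      = (List.range (s.length + 2)).map
          (fun (k : Nat) => ((pairsOf s).filter (bucketPred ((s.length : Int) + 1) k)).map
            (fun q => [q.1, q.2])) := by
    refine Eq.trans (foldl_pairs
      (fun bs i j =>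
        if j != -1 then
          let len : Int := if i < j then j - i - 1 else i - j + 1
          if 0 ≤ len && len ≤ ((s.length : Int) + 1) then
            bs.modify len.toNat (fun b => b ++ [[i, j]])
          else bs
        else bs)
      (PySem.List.enumerate s) (List.replicate (s.length + 2) ([] : List (List Int)))) ?_
    apply List.ext_getElem?
    intro k
    refine Eq.trans (bucket_char ((s.length : Int) + 1) (pairsOf s)
      (List.replicate (s.length + 2) ([] : List (List Int))) k) ?_
    by_cases hk : k < s.length + 2
    · simp [hk]
    · simp [hk]
  have e2 : edges2print_alt s
      = ((PySem.List.enumerate s).foldl (fun bs p =>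
          p.2.foldl (fun bs j =>
            if j != -1 then
              let len : Int := if p.1 < j then j - p.1 - 1 else p.1 - j + 1
              if 0 ≤ len && len ≤ ((s.length : Int) + 1) then
                bs.modify len.toNat (fun b => b ++ [[p.1, j]])
              else bs
            else bs) bs)
          (List.replicate (s.length + 2) ([] : List (List Int)))).foldl
          (fun layers bucket => bucket.foldl (fun layers edge => placeB edge layers) layers) [] := rfl
  rw [e2, hbuild, List.foldl_map,
    foldl_flatMap (fun (k : Nat) =>
      ((pairsOf s).filter (bucketPred ((s.length : Int) + 1) k)).map (fun q => [q.1, q.2]))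
      (fun ly e => placeB e ly) (List.range (s.length + 2)) []]

theorem edges2print_spec' : ∀ s, edges2print s = edges2print_alt s := by
  intro s
  rw [A_as_stream, B_as_stream]
  have hf : (fun ly e => placeA e ly)
      = (fun (ly : List (List (List Int))) (e : List Int) => placeB e ly) := by
    funext ly e
    exact placeA_eq_placeB e ly
  rw [hf]
  congr 1
  refine List.flatMap_congr (fun k hk => ?_)
  rw [List.mem_range] at hk
  congr 1
  exact List.filter_congr (fun q _ => pred_eq s.length k hk q)

-- ===== VERDICT (by name: the statement is the Claim_ definition above) =====
theorem edges2print_spec : Claim_equal_edges2print := by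
  intro successors _
  exact edges2print_spec' successors
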